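-- pv_equiv track=rewrite | github.com/rnat697/coding-interview-university | python_code/questions/medium/minimumLoss.py | minimumLossOptimal
-- ===== SOURCE A (Python) =====
-- def minimumLossOptimal(price:list):
--   minLoss = 10**16
--   # Creating a list of indicies in sorted descending order
--   # i.e: price = [5,10,3] --> indices = [0,1,2] --> sortedIndicies = [1,0,2]
--   # range(len(prices)) creates a list of indices [0, 1, 2, ..., len(prices)-1].
--   # key=lambda x: prices[x] specifies that sorting should be based on the values in prices at each index x.
--   sortedIndices = sorted(range(len(price)), key=lambda x: price[x], reverse=True)
--
--   # Iterate through sorted indices to find minimum loss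
--   for i in range(len(sortedIndices)-1):
--     currentSortedIndex = sortedIndices[i]
--     nextSortedIndex = sortedIndices[i+1]
--
--     # i.e: sortedIndicies = [1,0,2] --> current = 1, next = 0 --> skip
--     # next iteration --> current = 0, next = 2 --> go in if
--     if currentSortedIndex < nextSortedIndex:
--       # Get original value from orignal array using the indicies we found
--       buyingPrice = price[currentSortedIndex]
--       sellingPrice = price[nextSortedIndex]
--
--       # Calculate loss
--       loss = buyingPrice - sellingPrice
--
--       # Update min_loss if current loss is smaller
--       minLoss = min(minLoss, loss)
--
--   return minLoss
-- ===== SOURCE B (Python) =====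
-- def minimumLossOptimal(price: list):
--     # Direct scan: for each selling position, compare with every earlier buying
--     # position; no sorting, no index permutation.
--     minLoss = 10**16
--     for i, sell in enumerate(price):
--         for buy in price[:i]:
--             if buy >= sell:
--                 minLoss = min(minLoss, buy - sell)
--     return minLoss
-- ===== Notes on version B (the rewrite author's own statement) =====
-- stated objective: simpler
-- what changed: Replaces the sort-indices-then-scan-adjacent-pairs algorithm with a direct two-loop minimum over all (earlier buy, later sell) pairs with buy >= sell; no sorting at all.
import Mathlib
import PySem

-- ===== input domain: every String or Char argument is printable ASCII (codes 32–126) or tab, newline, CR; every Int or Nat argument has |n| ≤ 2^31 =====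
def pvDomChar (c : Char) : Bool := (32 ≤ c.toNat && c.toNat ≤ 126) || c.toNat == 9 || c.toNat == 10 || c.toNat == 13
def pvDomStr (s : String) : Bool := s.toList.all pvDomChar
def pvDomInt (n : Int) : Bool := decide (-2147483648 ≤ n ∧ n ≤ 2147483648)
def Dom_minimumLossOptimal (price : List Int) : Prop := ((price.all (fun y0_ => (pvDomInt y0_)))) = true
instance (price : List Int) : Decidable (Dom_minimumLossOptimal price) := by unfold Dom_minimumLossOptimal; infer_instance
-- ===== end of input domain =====

-- B replaces A's sort-indices-then-scan-adjacent-pairs algorithm by a direct two-loop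
-- minimum over all (earlier buy, later sell) pairs with buy ≥ sell (simpler; no sort).

-- ===== PORT A =====
-- all list indexing in A is in range, so pyGetD with default 0 is exact
def minimumLossOptimal (price : List Int) : Int :=
  let sortedIndices := PySem.List.sorted (PySem.List.pyRange 0 (PySem.List.len price))
      (fun x => PySem.List.pyGetD price x 0) true
  (PySem.List.pyRange 0 (PySem.List.len sortedIndices - 1)).foldl
    (fun minLoss i =>
      let currentSortedIndex := PySem.List.pyGetD sortedIndices i 0
      let nextSortedIndex := PySem.List.pyGetD sortedIndices (i + 1) 0
      if currentSortedIndex < nextSortedIndex then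
        let buyingPrice := PySem.List.pyGetD price currentSortedIndex 0
        let sellingPrice := PySem.List.pyGetD price nextSortedIndex 0
        min minLoss (buyingPrice - sellingPrice)
      else minLoss)
    (10 ^ 16)

-- ===== PORT B =====
def minimumLossOptimal_alt (price : List Int) : Int :=
  (PySem.List.enumerate price 0).foldl
    (fun minLoss p =>
      (PySem.List.slice price none (some p.1)).foldl
        (fun m buy => if buy ≥ p.2 then min m (buy - p.2) else m)
        minLoss)
    (10 ^ 16)

-- ===== PRECONDITION & SPEC =====
def Spec_minimumLossOptimal (price : List Int) (out : Int) : Prop := out = minimumLossOptimal_alt price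
instance (price : List Int) (out : Int) : Decidable (Spec_minimumLossOptimal price out) := by unfold Spec_minimumLossOptimal; infer_instance

-- ===== CLAIM (what is proved, stated in full; the proofs are below) =====
def Claim_equal_minimumLossOptimal : Prop := ∀ (price : List Int), Dom_minimumLossOptimal price → Spec_minimumLossOptimal price (minimumLossOptimal price)

-- ===== LEMMAS AND PROOFS =====

-- the key A sorts by: the price stored at an index
def keyOf (price : List Int) (j : Int) : Int := PySem.List.pyGetD price j 0

-- the stable-descending order of A's sorted index list: strictly larger key,
-- or equal key and smaller original index (stability of Python's sort)
def IdxR (price : List Int) (a b : Int) : Prop :=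
  keyOf price b < keyOf price a ∨ (keyOf price a = keyOf price b ∧ a < b)

-- A's sorted index list
def sortA (price : List Int) : List Int :=
  PySem.List.sorted (PySem.List.pyRange 0 (PySem.List.len price))
    (fun x => PySem.List.pyGetD price x 0) true

-- the (buy, sell) pairs B's two loops run over, flattened
def pairsB (price : List Int) : List (Int × Int) :=
  ((PySem.List.pyRange 0 (PySem.List.len price)).map
    (fun i => (PySem.List.slice price none (some i)).map
      (fun buy => (buy, PySem.List.pyGetD price i 0)))).flatten

-- ---- generic facts about a "running minimum under a test" fold ----
theorem minfold_eq {α : Type} (P : α → Prop) [DecidablePred P] (f : α → Int)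
    (l : List α) (init : Int) :
    l.foldl (fun m x => if P x then min m (f x) else m) init
      = ((l.filter (fun x => decide (P x))).map f).foldl min init := by
  rw [PySem.List.foldl_ite_eq_foldl_filter, List.foldl_map]

theorem minfold_le_init {α : Type} (P : α → Prop) [DecidablePred P] (f : α → Int)
    (l : List α) (init : Int) :
    l.foldl (fun m x => if P x then min m (f x) else m) init ≤ init := by
  rw [minfold_eq]; exact (PySem.List.foldl_min_le _ _).1

theorem minfold_le_mem {α : Type} (P : α → Prop) [DecidablePred P] (f : α → Int)
    (l : List α) (init : Int) {x : α} (hx : x ∈ l) (hP : P x) :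
    l.foldl (fun m x => if P x then min m (f x) else m) init ≤ f x := by
  rw [minfold_eq]
  exact (PySem.List.foldl_min_le _ _).2 _
    (List.mem_map_of_mem (by rw [List.mem_filter]; exact ⟨hx, by simpa⟩))

theorem minfold_cases {α : Type} (P : α → Prop) [DecidablePred P] (f : α → Int)
    (l : List α) (init : Int) :
    l.foldl (fun m x => if P x then min m (f x) else m) init = init ∨
      ∃ x ∈ l, P x ∧ l.foldl (fun m x => if P x then min m (f x) else m) init = f x := by
  rw [minfold_eq]
  rcases PySem.List.foldl_min_mem (((l.filter (fun x => decide (P x))).map f)) init with h | h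
  · exact Or.inl h
  · right
    rcases List.mem_map.1 h with ⟨x, hxf, hfx⟩
    rcases List.mem_filter.1 hxf with ⟨hxl, hPx⟩
    exact ⟨x, hxl, by simpa using hPx, hfx.symm⟩

-- ---- A's loop over indices 0..len-2 is a fold over adjacent pairs of sortA ----
theorem map_idx_eq_zip_tail (s : List Int) :
    (PySem.List.pyRange 0 (PySem.List.len s - 1)).map
      (fun i => (PySem.List.pyGetD s i 0, PySem.List.pyGetD s (i + 1) 0))
      = s.zip s.tail := by
  have hlen : (PySem.List.pyRange 0 (PySem.List.len s - 1)).length = s.length - 1 := by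
    rw [PySem.List.length_pyRange_one, PySem.List.len_eq]; omega
  apply List.ext_getElem
  · simp [List.length_zip]
  · intro k h1 h2
    have hk : k < s.length - 1 := by simpa [hlen] using h1
    rw [List.getElem_map, List.getElem_zip, List.getElem_tail]
    have hget : (PySem.List.pyRange 0 (PySem.List.len s - 1))[k] = (k : Int) := by
      rw [PySem.List.getElem_pyRange_one]; ring
    rw [hget]
    have e1 : PySem.List.pyGetD s (k : Int) 0 = s[k]'(by omega) := by
      rw [PySem.List.pyGetD_eq_getElem s 0 (by positivity) (by exact_mod_cast (by omega : k < s.length))]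
      simp
    have e2 : PySem.List.pyGetD s ((k : Int) + 1) 0 = s[k+1]'(by omega) := by
      have : ((k : Int) + 1) = ((k + 1 : Nat) : Int) := by push_cast; ring
      rw [this, PySem.List.pyGetD_eq_getElem s 0 (by positivity) (by exact_mod_cast (by omega : k + 1 < s.length))]
      simp
    rw [e1, e2]

theorem A_eq_zipfold (price : List Int) :
    minimumLossOptimal price
      = ((sortA price).zip (sortA price).tail).foldl
          (fun m p => if p.1 < p.2 then min m (keyOf price p.1 - keyOf price p.2) else m)
          (10 ^ 16) := by
  rw [← map_idx_eq_zip_tail (sortA price), List.foldl_map]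
  simp only [minimumLossOptimal, sortA, keyOf]

-- ---- B is a fold over the flattened list of (buy, sell) pairs ----
theorem B_eq_pairfold (price : List Int) :
    minimumLossOptimal_alt price
      = (pairsB price).foldl
          (fun m q => if q.1 ≥ q.2 then min m (q.1 - q.2) else m)
          (10 ^ 16) := by
  simp only [minimumLossOptimal_alt, pairsB, List.foldl_flatten, List.foldl_map,
    PySem.List.enumerate_eq_map_pyRange price 0]

-- ---- the stability invariant of A's sort ----
theorem IdxR_key_le (price : List Int) {a b : Int} (h : IdxR price a b) :
    keyOf price b ≤ keyOf price a := by
  rcases h with h | ⟨h, _⟩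
  · exact le_of_lt h
  · exact le_of_eq h.symm

theorem insertBy_pairwise (price : List Int) (x : Int) (acc : List Int)
    (hp : acc.Pairwise (IdxR price)) (hlt : ∀ y ∈ acc, y < x) :
    (PySem.List.insertBy (fun a b => decide (keyOf price b < keyOf price a)) x acc).Pairwise
      (IdxR price) := by
  induction acc with
  | nil => simp [PySem.List.insertBy]
  | cons y ys ih =>
    rw [List.pairwise_cons] at hp
    by_cases hxy : keyOf price y < keyOf price x
    · have : PySem.List.insertBy (fun a b => decide (keyOf price b < keyOf price a)) x (y :: ys)
          = x :: y :: ys := by simp [PySem.List.insertBy, hxy]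
      rw [this, List.pairwise_cons]
      refine ⟨?_, List.pairwise_cons.2 hp⟩
      intro z hz
      rcases List.mem_cons.1 hz with rfl | hz'
      · exact Or.inl hxy
      · exact Or.inl (lt_of_le_of_lt (IdxR_key_le price (hp.1 z hz')) hxy)
    · have : PySem.List.insertBy (fun a b => decide (keyOf price b < keyOf price a)) x (y :: ys)
          = y :: PySem.List.insertBy (fun a b => decide (keyOf price b < keyOf price a)) x ys := by
        simp [PySem.List.insertBy, hxy]
      rw [this, List.pairwise_cons]
      constructor
      · intro z hz
        rcases (PySem.List.mem_insertBy _ _ _ _).1 hz with hzx | hz'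
        · -- z = x : stability, x is the later original index
          rw [hzx]
          rcases lt_or_ge (keyOf price x) (keyOf price y) with h | h
          · exact Or.inl h
          · exact Or.inr ⟨le_antisymm h (not_lt.1 hxy), hlt y (List.mem_cons_self)⟩
        · exact hp.1 z hz'
      · exact ih hp.2 (fun z hz => hlt z (List.mem_cons_of_mem _ hz))

theorem foldl_ins_pairwise (price : List Int) :
    ∀ (l acc : List Int), acc.Pairwise (IdxR price) → l.Pairwise (· < ·) →
      (∀ y ∈ acc, ∀ x ∈ l, y < x) →
      (l.foldl (fun acc x =>
          PySem.List.insertBy (fun a b => decide (keyOf price b < keyOf price a)) x acc) acc).Pairwise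
        (IdxR price) := by
  intro l
  induction l with
  | nil => intro acc h _ _; simpa using h
  | cons x t ih =>
    intro acc hacc hl hsep
    rw [List.pairwise_cons] at hl
    simp only [List.foldl_cons]
    apply ih
    · exact insertBy_pairwise price x acc hacc (fun y hy => hsep y hy x List.mem_cons_self)
    · exact hl.2
    · intro y hy z hz
      rcases (PySem.List.mem_insertBy _ _ _ _).1 hy with hyx | hy'
      · rw [hyx]; exact hl.1 z hz
      · exact hsep y hy' z (List.mem_cons_of_mem _ hz)

theorem sortA_pairwise (price : List Int) :
    (sortA price).Pairwise (IdxR price) := by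
  have h := PySem.List.sorted_rev_eq_foldl_insertBy
    (PySem.List.pyRange 0 (PySem.List.len price)) (fun x => PySem.List.pyGetD price x 0)
  unfold sortA
  rw [h]
  exact foldl_ins_pairwise price _ [] List.Pairwise.nil
    (PySem.List.pairwise_lt_pyRange_one 0 _) (by simp)

-- ---- basic facts about sortA and pairsB ----
theorem sortA_length (price : List Int) : (sortA price).length = price.length := by
  rw [sortA, PySem.List.length_sorted, PySem.List.length_pyRange_one, PySem.List.len_eq]
  omega

theorem mem_sortA (price : List Int) (x : Int) :
    x ∈ sortA price ↔ 0 ≤ x ∧ x < (price.length : Int) := by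
  rw [sortA, PySem.List.mem_sorted, PySem.List.mem_pyRange_one, PySem.List.len_eq]

theorem keyOf_natCast (price : List Int) {j : Nat} (h : j < price.length) :
    keyOf price (j : Int) = price[j] := by
  rw [keyOf, PySem.List.pyGetD_eq_getElem price 0 (by positivity) (by exact_mod_cast h)]
  simp

theorem key_mono (price : List Int) {p q : Nat} (hq : q < (sortA price).length) (hpq : p ≤ q) :
    keyOf price ((sortA price)[q]) ≤ keyOf price ((sortA price)[p]'(by omega)) := by
  rcases eq_or_lt_of_le hpq with rfl | hlt
  · exact le_refl _
  · exact IdxR_key_le price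
      ((List.pairwise_iff_getElem.1 (sortA_pairwise price)) p q (by omega) hq hlt)

theorem mem_zip_tail_intro (s : List Int) (k : Nat) (h : k + 1 < s.length) :
    (s[k]'(by omega), s[k + 1]) ∈ s.zip s.tail := by
  rw [List.mem_iff_getElem]
  refine ⟨k, by simp [List.length_zip]; omega, ?_⟩
  rw [List.getElem_zip, List.getElem_tail]

theorem mem_zip_tail_elim (s : List Int) {q : Int × Int} (h : q ∈ s.zip s.tail) :
    ∃ k, ∃ _ : k + 1 < s.length, q = (s[k]'(by omega), s[k + 1]) := by
  rw [List.mem_iff_getElem] at h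
  rcases h with ⟨k, hk, hq⟩
  have hk' : k + 1 < s.length := by
    simp [List.length_zip] at hk; omega
  refine ⟨k, hk', ?_⟩
  rw [← hq, List.getElem_zip, List.getElem_tail]

theorem mem_pairsB_intro (price : List Int) (j i : Nat) (hji : j < i) (hi : i < price.length) :
    (price[j]'(by omega), price[i]) ∈ pairsB price := by
  rw [pairsB, List.mem_flatten]
  refine ⟨(PySem.List.slice price none (some (i : Int))).map
      (fun buy => (buy, PySem.List.pyGetD price (i : Int) 0)), ?_, ?_⟩
  · exact List.mem_map_of_mem (by
      rw [PySem.List.mem_pyRange_one, PySem.List.len_eq]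
      constructor <;> omega)
  · rw [PySem.List.slice_to price (by positivity)]
    have h1 : PySem.List.pyGetD price (i : Int) 0 = price[i] := keyOf_natCast price hi
    rw [h1]
    apply List.mem_map_of_mem
    rw [List.mem_take_iff_getElem]
    exact ⟨j, by simp; omega, rfl⟩

theorem mem_pairsB_elim (price : List Int) {q : Int × Int} (h : q ∈ pairsB price) :
    ∃ j i : Nat, ∃ _ : j < i, ∃ _ : i < price.length,
      q = (price[j]'(by omega), price[i]) := by
  rw [pairsB, List.mem_flatten] at h
  rcases h with ⟨l, hl, hq⟩
  rcases List.mem_map.1 hl with ⟨iI, hiI, rfl⟩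
  rw [PySem.List.mem_pyRange_one, PySem.List.len_eq] at hiI
  rcases List.mem_map.1 hq with ⟨buy, hbuy, rfl⟩
  rw [PySem.List.slice_to price hiI.1, List.mem_take_iff_getElem] at hbuy
  rcases hbuy with ⟨j, hj, rfl⟩
  have hi : iI.toNat < price.length := by omega
  refine ⟨j, iI.toNat, by omega, hi, ?_⟩
  have h1 : PySem.List.pyGetD price iI 0 = price[iI.toNat] := by
    rw [PySem.List.pyGetD_eq_getElem price 0 hiI.1 hiI.2]
  rw [h1]

-- ---- a run of sortA whose endpoints' indices rise contains an adjacent rise ----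
theorem exists_rise (s : List Int) :
    ∀ (d a b : Nat) (_ : b - a ≤ d) (_ : a < b) (hb : b < s.length),
      s[a]'(by omega) < s[b] →
      ∃ k, ∃ _ : k + 1 < s.length, a ≤ k ∧ k + 1 ≤ b ∧ s[k] < s[k + 1]'(by omega) := by
  intro d
  induction d with
  | zero => intro a b h1 h2 hb _; omega
  | succ d ih =>
    intro a b h1 h2 hb hlt
    have ha1 : a + 1 < s.length := by omega
    by_cases hstep : s[a]'(by omega) < s[a + 1]
    · exact ⟨a, by omega, le_refl a, by omega, hstep⟩
    · have hne : a + 1 ≠ b := by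
        intro h
        subst h
        exact hstep hlt
      have hlt' : s[a + 1] < s[b] := lt_of_le_of_lt (not_lt.1 hstep) hlt
      rcases ih (a + 1) b (by omega) (by omega) hb hlt' with ⟨k, hk, hak, hkb, hs⟩
      exact ⟨k, hk, by omega, hkb, hs⟩

-- ---- A's result is at most any valid (buy, sell) loss ----
theorem A_le_pair (price : List Int) (j i : Nat) (hji : j < i) (hi : i < price.length)
    (hge : price[i] ≤ price[j]'(by omega)) :
    ((sortA price).zip (sortA price).tail).foldl
        (fun m p => if p.1 < p.2 then min m (keyOf price p.1 - keyOf price p.2) else m)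
        (10 ^ 16)
      ≤ price[j]'(by omega) - price[i] := by
  have hslen : (sortA price).length = price.length := sortA_length price
  have hjs : (j : Int) ∈ sortA price := by
    rw [mem_sortA]; constructor <;> [positivity; exact_mod_cast (by omega : j < price.length)]
  have his : (i : Int) ∈ sortA price := by
    rw [mem_sortA]; constructor <;> [positivity; exact_mod_cast hi]
  rcases List.mem_iff_getElem.1 hjs with ⟨a, ha, hsa⟩
  rcases List.mem_iff_getElem.1 his with ⟨b, hb, hsb⟩
  have hkj : keyOf price ((sortA price)[a]) = price[j]'(by omega) := by
    rw [hsa]; exact keyOf_natCast price (by omega)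
  have hki : keyOf price ((sortA price)[b]) = price[i] := by
    rw [hsb]; exact keyOf_natCast price hi
  have hab : a < b := by
    rcases Nat.lt_trichotomy a b with h | h | h
    · exact h
    · exfalso
      subst h
      have : (j : Int) = (i : Int) := by rw [← hsa, ← hsb]
      omega
    · exfalso
      have hR : IdxR price ((sortA price)[b]) ((sortA price)[a]) :=
        (List.pairwise_iff_getElem.1 (sortA_pairwise price)) b a hb ha h
      rcases hR with hR | ⟨_, hR⟩
      · rw [hkj, hki] at hR; omega
      · rw [hsa, hsb] at hR
        exact absurd (by exact_mod_cast hR : i < j) (by omega)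
  have hsab : (sortA price)[a] < (sortA price)[b] := by
    rw [hsa, hsb]; exact_mod_cast hji
  rcases exists_rise (sortA price) b a b (by omega) hab hb hsab with ⟨k, hk1, hak, hkb, hrise⟩
  have hcand := minfold_le_mem (fun p : Int × Int => p.1 < p.2)
    (fun p => keyOf price p.1 - keyOf price p.2)
    ((sortA price).zip (sortA price).tail) (10 ^ 16)
    (mem_zip_tail_intro (sortA price) k hk1) hrise
  have h1 : keyOf price ((sortA price)[k]'(by omega)) ≤ keyOf price ((sortA price)[a]) :=
    key_mono price (by omega) hak
  have h2 : keyOf price ((sortA price)[b]) ≤ keyOf price ((sortA price)[k + 1]) :=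
    key_mono price hb hkb
  rw [hkj] at h1
  rw [hki] at h2
  calc ((sortA price).zip (sortA price).tail).foldl
        (fun m p => if p.1 < p.2 then min m (keyOf price p.1 - keyOf price p.2) else m)
        (10 ^ 16)
      ≤ keyOf price ((sortA price)[k]'(by omega)) - keyOf price ((sortA price)[k + 1]) := hcand
    _ ≤ price[j]'(by omega) - price[i] := by omega

theorem main_eq (price : List Int) :
    minimumLossOptimal price = minimumLossOptimal_alt price := by
  rw [A_eq_zipfold, B_eq_pairfold]
  apply le_antisymm
  · -- A ≤ B
    rcases minfold_cases (fun q : Int × Int => q.1 ≥ q.2) (fun q => q.1 - q.2)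
        (pairsB price) (10 ^ 16) with hB | ⟨q, hq, hPq, hBval⟩
    · rw [hB]
      exact minfold_le_init _ _ _ _
    · rw [hBval]
      rcases mem_pairsB_elim price hq with ⟨j, i, hji, hi, rfl⟩
      exact A_le_pair price j i hji hi (by simpa using hPq)
  · -- B ≤ A
    rcases minfold_cases (fun p : Int × Int => p.1 < p.2)
        (fun p => keyOf price p.1 - keyOf price p.2)
        ((sortA price).zip (sortA price).tail) (10 ^ 16) with hA | ⟨p, hp, hPp, hAval⟩
    · rw [hA]
      exact minfold_le_init _ _ _ _
    · rw [hAval]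
      rcases mem_zip_tail_elim (sortA price) hp with ⟨k, hk, rfl⟩
      simp only at hPp ⊢
      have hslen : (sortA price).length = price.length := sortA_length price
      have hka := (mem_sortA price _).1 (List.mem_iff_getElem.2 ⟨k, by omega, rfl⟩)
      have hkb := (mem_sortA price _).1 (List.mem_iff_getElem.2 ⟨k + 1, hk, rfl⟩)
      set x := (sortA price)[k]'(by omega) with hxdef
      set y := (sortA price)[k + 1] with hydef
      have hkey : keyOf price y ≤ keyOf price x := key_mono price hk (by omega)
      have hxk : keyOf price x = price[x.toNat]'(by omega) := by
        rw [keyOf, PySem.List.pyGetD_eq_getElem price 0 hka.1 hka.2]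
      have hyk : keyOf price y = price[y.toNat]'(by omega) := by
        rw [keyOf, PySem.List.pyGetD_eq_getElem price 0 hkb.1 hkb.2]
      have hxy : x.toNat < y.toNat := by omega
      have hyl : y.toNat < price.length := by omega
      have hcand := minfold_le_mem (fun q : Int × Int => q.1 ≥ q.2) (fun q => q.1 - q.2)
        (pairsB price) (10 ^ 16)
        (mem_pairsB_intro price x.toNat y.toNat hxy hyl)
        (by simp only; rw [← hxk, ← hyk]; exact hkey)
      simp only at hcand
      rw [← hxk, ← hyk] at hcand
      exact hcand

-- ===== VERDICT (by name: the statement is the Claim_ definition above) =====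
theorem minimumLossOptimal_spec : Claim_equal_minimumLossOptimal := by
  intro price _
  exact main_eq price
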